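-- pv_equiv track=rewrite | github.com/maxmoneycash/ohlone-unicode | data/mutsun_dictionary_db.py | mutsun_to_ipa
-- ===== SOURCE A (Python) =====
-- def mutsun_to_ipa(word: str) -> str:
--     """Convert a Mutsun orthographic word to approximate IPA."""
--     ipa_map = [
--         ("tY", "tʲ"), ("ts", "ts"),
--         ("L", "lʲ"), ("N", "ɲ"), ("S", "ʂ"), ("T", "ʈ"),
--         ("c", "tʃ"), ("h", "h"), ("k", "k"), ("l", "l"),
--         ("m", "m"), ("n", "n"), ("p", "p"), ("r", "ɾ"),
--         ("s", "s"), ("t", "t"), ("w", "w"), ("y", "j"),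
--         ("d", "d"), ("ʼ", "ʔ"), ("'", "ʔ"),
--         ("aa", "aː"), ("ee", "eː"), ("ii", "iː"), ("oo", "oː"), ("uu", "uː"),
--         ("a", "a"), ("e", "e"), ("i", "i"), ("o", "o"), ("u", "u"),
--     ]
--     result = []
--     i = 0
--     clean = word.lstrip("*-").rstrip("-")
--     while i < len(clean):
--         matched = False
--         for src, tgt in ipa_map:
--             if clean[i:i+len(src)] == src:
--                 result.append(tgt)
--                 i += len(src)
--                 matched = True
--                 break
--         if not matched:
--             result.append(clean[i])
--             i += 1
--     return "".join(result)
-- ===== SOURCE B (Python) =====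
-- _DIGRAPHS = {"tY": "t\u02b2", "ts": "ts",
--              "aa": "a\u02d0", "ee": "e\u02d0", "ii": "i\u02d0",
--              "oo": "o\u02d0", "uu": "u\u02d0"}
-- _SINGLE = {"L": "l\u02b2", "N": "\u0272", "S": "\u0282", "T": "\u0288",
--            "c": "t\u0283", "h": "h", "k": "k", "l": "l",
--            "m": "m", "n": "n", "p": "p", "r": "\u027e",
--            "s": "s", "t": "t", "w": "w", "y": "j",
--            "d": "d", "\u02bc": "\u0294", "'": "\u0294",
--            "a": "a", "e": "e", "i": "i", "o": "o", "u": "u"}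
-- _STARTERS = "taeiou"  # the characters that can begin a digraph
--
--
-- def mutsun_to_ipa(word: str) -> str:
--     """Convert a Mutsun orthographic word to approximate IPA.
--
--     Streaming state machine: walk the characters once, carrying at most one
--     pending digraph-starter character; no indexing or slicing.
--     """
--     clean = word.lstrip("*-").rstrip("-")
--     out = []
--     pending = ""
--     for ch in clean:
--         if pending:
--             two = pending + ch
--             if two in _DIGRAPHS:
--                 out.append(_DIGRAPHS[two])
--                 pending = ""
--                 continue
--             out.append(_SINGLE.get(pending, pending))
--             pending = ""
--         if ch in _STARTERS:
--             pending = ch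
--         else:
--             out.append(_SINGLE.get(ch, ch))
--     if pending:
--         out.append(_SINGLE.get(pending, pending))
--     return "".join(out)
-- ===== Notes on version B (the rewrite author's own statement) =====
-- stated objective: faster
-- what changed: Replaced A's index-based loop that at each position linearly scans an ordered 31-pair list and compares string slices by a single streaming pass over the characters that carries at most one pending digraph-starter character ('t' or a vowel) and consults two dicts, with no indexing or slicing; correct because every digraph source in A's list precedes its one-character prefix, so A's first-match rule is exactly digraph-first at starter characters.
import Mathlib
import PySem

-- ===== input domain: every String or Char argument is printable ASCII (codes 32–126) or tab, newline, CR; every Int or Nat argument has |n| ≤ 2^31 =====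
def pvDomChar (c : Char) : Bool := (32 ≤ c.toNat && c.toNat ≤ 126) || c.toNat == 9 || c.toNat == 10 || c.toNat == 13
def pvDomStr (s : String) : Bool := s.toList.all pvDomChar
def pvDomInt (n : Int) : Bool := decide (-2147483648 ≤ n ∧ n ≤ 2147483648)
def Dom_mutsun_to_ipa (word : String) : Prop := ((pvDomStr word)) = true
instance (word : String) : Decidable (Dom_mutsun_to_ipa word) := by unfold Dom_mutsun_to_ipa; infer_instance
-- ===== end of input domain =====

-- B replaces A's per-position ordered scan of a 31-pair list (with substring slicing)
-- by a single streaming pass carrying one pending digraph-starter character; the timing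
-- run measured B faster by a constant factor.


-- Shared hand port of `word.lstrip("*-").rstrip("-")` (this exact line occurs in both
-- Pythons); exact: lstrip/rstrip with a char-set argument drop those chars from the ends.
def mutsunClean (cs : List Char) : List Char :=
  ((cs.dropWhile (fun c => c == '*' || c == '-')).reverse.dropWhile (fun c => c == '-')).reverse

-- ===== PORT A =====
-- A's ordered (source, target) list; targets kept as char lists (the result is joined at the end).
def ipaMapA : List (List Char × List Char) := [
  (['t','Y'], ['t','ʲ']), (['t','s'], ['t','s']),
  (['L'], ['l','ʲ']), (['N'], ['ɲ']), (['S'], ['ʂ']), (['T'], ['ʈ']),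
  (['c'], ['t','ʃ']), (['h'], ['h']), (['k'], ['k']), (['l'], ['l']),
  (['m'], ['m']), (['n'], ['n']), (['p'], ['p']), (['r'], ['ɾ']),
  (['s'], ['s']), (['t'], ['t']), (['w'], ['w']), (['y'], ['j']),
  (['d'], ['d']), (['ʼ'], ['ʔ']), (['\''], ['ʔ']),
  (['a','a'], ['a','ː']), (['e','e'], ['e','ː']), (['i','i'], ['i','ː']),
  (['o','o'], ['o','ː']), (['u','u'], ['u','ː']),
  (['a'], ['a']), (['e'], ['e']), (['i'], ['i']), (['o'], ['o']), (['u'], ['u'])]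

-- A's inner `for src, tgt in ipa_map: if clean[i:i+len(src)] == src: … break`
-- (cs is clean[i:], so the slice clean[i:i+len(src)] is cs.take src.length).
def aScan : List (List Char × List Char) → List Char → Option (List Char × List Char)
  | [], _ => none
  | (src, tgt) :: rest, cs => if cs.take src.length = src then some (src, tgt) else aScan rest cs

-- every matched source comes from the map (used only for the loop's termination)
theorem aScan_mem {m : List (List Char × List Char)} {cs : List Char}
    {p : List Char × List Char} (h : aScan m cs = some p) : p ∈ m := by
  induction m with
  | nil => simp [aScan] at h
  | cons q rest ih =>
    rw [show aScan (q :: rest) cs = if cs.take q.1.length = q.1 then some q else aScan rest cs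
        from rfl] at h
    split at h
    · simp_all
    · exact List.mem_cons_of_mem _ (ih h)

-- A's `while i < len(clean)` loop, index i represented by the remaining suffix cs = clean[i:].
def aLoop (cs : List Char) : List (List Char) :=
  match cs with
  | [] => []
  | c :: rest =>
    match h : aScan ipaMapA (c :: rest) with
    | some (src, tgt) => tgt :: aLoop ((c :: rest).drop src.length)
    | none => [c] :: aLoop rest
termination_by cs.length
decreasing_by
  · have hm := aScan_mem h
    have : 0 < src.length := by
      fin_cases hm <;> simp
    simp
    omega
  · simp

def mutsun_to_ipa (word : String) : String :=
  String.ofList (PySem.Chars.join [] (aLoop (mutsunClean word.toList)))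

-- ===== PORT B =====
-- B's two module-level dicts (keys as char lists = the Python strings' code points).
def digraphsB : PySem.Dict (List Char) (List Char) := PySem.Dict.ofList [
  (['t','Y'], ['t','ʲ']), (['t','s'], ['t','s']),
  (['a','a'], ['a','ː']), (['e','e'], ['e','ː']), (['i','i'], ['i','ː']),
  (['o','o'], ['o','ː']), (['u','u'], ['u','ː'])]

def singleB : PySem.Dict (List Char) (List Char) := PySem.Dict.ofList [
  (['L'], ['l','ʲ']), (['N'], ['ɲ']), (['S'], ['ʂ']), (['T'], ['ʈ']),
  (['c'], ['t','ʃ']), (['h'], ['h']), (['k'], ['k']), (['l'], ['l']),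
  (['m'], ['m']), (['n'], ['n']), (['p'], ['p']), (['r'], ['ɾ']),
  (['s'], ['s']), (['t'], ['t']), (['w'], ['w']), (['y'], ['j']),
  (['d'], ['d']), (['ʼ'], ['ʔ']), (['\''], ['ʔ']),
  (['a'], ['a']), (['e'], ['e']), (['i'], ['i']), (['o'], ['o']), (['u'], ['u'])]

-- _STARTERS = "taeiou"
def bStarters : List Char := ['t','a','e','i','o','u']

-- B's `for ch in clean` loop with the carried `pending` string ("" or one starter char);
-- the `continue` is the `some` branch, the post-loop flush is the `[]` case.
def bLoop : List Char → List Char → List (List Char)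
  | pending, [] => if pending.isEmpty then [] else [singleB.getD pending pending]
  | pending, c :: rest =>
    if pending.isEmpty then
      (if bStarters.contains c then bLoop [c] rest
       else singleB.getD [c] [c] :: bLoop [] rest)
    else
      match digraphsB.get? (pending ++ [c]) with
      | some t => t :: bLoop [] rest
      | none =>
        if bStarters.contains c then singleB.getD pending pending :: bLoop [c] rest
        else singleB.getD pending pending :: singleB.getD [c] [c] :: bLoop [] rest

def mutsun_to_ipa_alt (word : String) : String :=
  String.ofList (PySem.Chars.join [] (bLoop [] (mutsunClean word.toList)))

-- ===== PRECONDITION & SPEC =====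
def Spec_mutsun_to_ipa (word : String) (out : String) : Prop := out = mutsun_to_ipa_alt word
instance (word : String) (out : String) : Decidable (Spec_mutsun_to_ipa word out) := by unfold Spec_mutsun_to_ipa; infer_instance

-- ===== CLAIM (what is proved, stated in full; the proofs are below) =====
def Claim_equal_mutsun_to_ipa : Prop := ∀ (word : String), Dom_mutsun_to_ipa word → Spec_mutsun_to_ipa word (mutsun_to_ipa word)

-- ===== LEMMAS AND PROOFS =====

theorem digraphsB_items : digraphsB.items = [(['t','Y'], ['t','ʲ']), (['t','s'], ['t','s']),
    (['a','a'], ['a','ː']), (['e','e'], ['e','ː']), (['i','i'], ['i','ː']),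
    (['o','o'], ['o','ː']), (['u','u'], ['u','ː'])] := by decide

set_option maxHeartbeats 1000000 in
theorem singleB_items : singleB.items = [
  (['L'], ['l','ʲ']), (['N'], ['ɲ']), (['S'], ['ʂ']), (['T'], ['ʈ']),
  (['c'], ['t','ʃ']), (['h'], ['h']), (['k'], ['k']), (['l'], ['l']),
  (['m'], ['m']), (['n'], ['n']), (['p'], ['p']), (['r'], ['ɾ']),
  (['s'], ['s']), (['t'], ['t']), (['w'], ['w']), (['y'], ['j']),
  (['d'], ['d']), (['ʼ'], ['ʔ']), (['\''], ['ʔ']),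
  (['a'], ['a']), (['e'], ['e']), (['i'], ['i']), (['o'], ['o']), (['u'], ['u'])] := by decide

theorem digraph_singleton_none (c : Char) : digraphsB.get? [c] = none := by
  simp [PySem.Dict.get?, digraphsB_items]

-- no digraph key starts with a character outside "taeiou"
theorem digraph_nonstarter_none (c : Char) (l : List Char)
    (hc : bStarters.contains c = false) : digraphsB.get? (c :: l) = none := by
  simp [bStarters] at hc
  obtain ⟨h0, h1, h2, h3, h4, h5⟩ := hc
  simp [PySem.Dict.get?, digraphsB_items, Ne.symm h0, Ne.symm h1, Ne.symm h2, Ne.symm h3, Ne.symm h4, Ne.symm h5]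

set_option maxHeartbeats 2000000 in
theorem scan_eq (c : Char) (rest : List Char) :
    aScan ipaMapA (c :: rest) =
      (match digraphsB.get? ((c :: rest).take 2) with
       | some t => some ((c :: rest).take 2, t)
       | none =>
         match singleB.get? [c] with
         | some t => some ([c], t)
         | none => none) := by
  cases rest with
  | nil =>
    by_cases h0 : c = 'L'
    · subst h0; decide
    by_cases h1 : c = 'N'
    · subst h1; decide
    by_cases h2 : c = 'S'
    · subst h2; decide
    by_cases h3 : c = 'T'
    · subst h3; decide
    by_cases h4 : c = 'c'
    · subst h4; decide
    by_cases h5 : c = 'h'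
    · subst h5; decide
    by_cases h6 : c = 'k'
    · subst h6; decide
    by_cases h7 : c = 'l'
    · subst h7; decide
    by_cases h8 : c = 'm'
    · subst h8; decide
    by_cases h9 : c = 'n'
    · subst h9; decide
    by_cases h10 : c = 'p'
    · subst h10; decide
    by_cases h11 : c = 'r'
    · subst h11; decide
    by_cases h12 : c = 's'
    · subst h12; decide
    by_cases h13 : c = 't'
    · subst h13; decide
    by_cases h14 : c = 'w'
    · subst h14; decide
    by_cases h15 : c = 'y'
    · subst h15; decide
    by_cases h16 : c = 'd'
    · subst h16; decide
    by_cases h17 : c = 'ʼ'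
    · subst h17; decide
    by_cases h18 : c = '\''
    · subst h18; decide
    by_cases h19 : c = 'a'
    · subst h19; decide
    by_cases h20 : c = 'e'
    · subst h20; decide
    by_cases h21 : c = 'i'
    · subst h21; decide
    by_cases h22 : c = 'o'
    · subst h22; decide
    by_cases h23 : c = 'u'
    · subst h23; decide
    simp [aScan, ipaMapA, PySem.Dict.get?, PySem.Dict.getD, digraphsB_items, singleB_items, h0, Ne.symm h0, h1, Ne.symm h1, h2, Ne.symm h2, h3, Ne.symm h3, h4, Ne.symm h4, h5, Ne.symm h5, h6, Ne.symm h6, h7, Ne.symm h7, h8, Ne.symm h8, h9, Ne.symm h9, h10, Ne.symm h10, h11, Ne.symm h11, h12, Ne.symm h12, h13, Ne.symm h13, h14, Ne.symm h14, h15, Ne.symm h15, h16, Ne.symm h16, h17, Ne.symm h17, h18, Ne.symm h18, h19, Ne.symm h19, h20, Ne.symm h20, h21, Ne.symm h21, h22, Ne.symm h22, h23, Ne.symm h23]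
  | cons c' rest' =>
    by_cases g0 : c = 'L'
    · subst g0; simp [aScan, ipaMapA, PySem.Dict.get?, PySem.Dict.getD, digraphsB_items, singleB_items]
    by_cases g1 : c = 'N'
    · subst g1; simp [aScan, ipaMapA, PySem.Dict.get?, PySem.Dict.getD, digraphsB_items, singleB_items]
    by_cases g2 : c = 'S'
    · subst g2; simp [aScan, ipaMapA, PySem.Dict.get?, PySem.Dict.getD, digraphsB_items, singleB_items]
    by_cases g3 : c = 'T'
    · subst g3; simp [aScan, ipaMapA, PySem.Dict.get?, PySem.Dict.getD, digraphsB_items, singleB_items]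
    by_cases g4 : c = 'c'
    · subst g4; simp [aScan, ipaMapA, PySem.Dict.get?, PySem.Dict.getD, digraphsB_items, singleB_items]
    by_cases g5 : c = 'h'
    · subst g5; simp [aScan, ipaMapA, PySem.Dict.get?, PySem.Dict.getD, digraphsB_items, singleB_items]
    by_cases g6 : c = 'k'
    · subst g6; simp [aScan, ipaMapA, PySem.Dict.get?, PySem.Dict.getD, digraphsB_items, singleB_items]
    by_cases g7 : c = 'l'
    · subst g7; simp [aScan, ipaMapA, PySem.Dict.get?, PySem.Dict.getD, digraphsB_items, singleB_items]
    by_cases g8 : c = 'm'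
    · subst g8; simp [aScan, ipaMapA, PySem.Dict.get?, PySem.Dict.getD, digraphsB_items, singleB_items]
    by_cases g9 : c = 'n'
    · subst g9; simp [aScan, ipaMapA, PySem.Dict.get?, PySem.Dict.getD, digraphsB_items, singleB_items]
    by_cases g10 : c = 'p'
    · subst g10; simp [aScan, ipaMapA, PySem.Dict.get?, PySem.Dict.getD, digraphsB_items, singleB_items]
    by_cases g11 : c = 'r'
    · subst g11; simp [aScan, ipaMapA, PySem.Dict.get?, PySem.Dict.getD, digraphsB_items, singleB_items]
    by_cases g12 : c = 's'
    · subst g12; simp [aScan, ipaMapA, PySem.Dict.get?, PySem.Dict.getD, digraphsB_items, singleB_items]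
    by_cases g13 : c = 't'
    · subst g13
      by_cases hY : c' = 'Y'
      · subst hY; simp [aScan, ipaMapA, PySem.Dict.get?, PySem.Dict.getD, digraphsB_items, singleB_items]
      by_cases hs : c' = 's'
      · subst hs; simp [aScan, ipaMapA, PySem.Dict.get?, PySem.Dict.getD, digraphsB_items, singleB_items, hY, Ne.symm hY]
      simp [aScan, ipaMapA, PySem.Dict.get?, PySem.Dict.getD, digraphsB_items, singleB_items, hY, Ne.symm hY, hs, Ne.symm hs]
    by_cases g14 : c = 'w'
    · subst g14; simp [aScan, ipaMapA, PySem.Dict.get?, PySem.Dict.getD, digraphsB_items, singleB_items]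
    by_cases g15 : c = 'y'
    · subst g15; simp [aScan, ipaMapA, PySem.Dict.get?, PySem.Dict.getD, digraphsB_items, singleB_items]
    by_cases g16 : c = 'd'
    · subst g16; simp [aScan, ipaMapA, PySem.Dict.get?, PySem.Dict.getD, digraphsB_items, singleB_items]
    by_cases g17 : c = 'ʼ'
    · subst g17; simp [aScan, ipaMapA, PySem.Dict.get?, PySem.Dict.getD, digraphsB_items, singleB_items]
    by_cases g18 : c = '\''
    · subst g18; simp [aScan, ipaMapA, PySem.Dict.get?, PySem.Dict.getD, digraphsB_items, singleB_items]
    by_cases g19 : c = 'a'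
    · subst g19
      by_cases hv : c' = 'a'
      · subst hv; simp [aScan, ipaMapA, PySem.Dict.get?, PySem.Dict.getD, digraphsB_items, singleB_items]
      simp [aScan, ipaMapA, PySem.Dict.get?, PySem.Dict.getD, digraphsB_items, singleB_items, hv, Ne.symm hv]
    by_cases g20 : c = 'e'
    · subst g20
      by_cases hv : c' = 'e'
      · subst hv; simp [aScan, ipaMapA, PySem.Dict.get?, PySem.Dict.getD, digraphsB_items, singleB_items]
      simp [aScan, ipaMapA, PySem.Dict.get?, PySem.Dict.getD, digraphsB_items, singleB_items, hv, Ne.symm hv]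
    by_cases g21 : c = 'i'
    · subst g21
      by_cases hv : c' = 'i'
      · subst hv; simp [aScan, ipaMapA, PySem.Dict.get?, PySem.Dict.getD, digraphsB_items, singleB_items]
      simp [aScan, ipaMapA, PySem.Dict.get?, PySem.Dict.getD, digraphsB_items, singleB_items, hv, Ne.symm hv]
    by_cases g22 : c = 'o'
    · subst g22
      by_cases hv : c' = 'o'
      · subst hv; simp [aScan, ipaMapA, PySem.Dict.get?, PySem.Dict.getD, digraphsB_items, singleB_items]
      simp [aScan, ipaMapA, PySem.Dict.get?, PySem.Dict.getD, digraphsB_items, singleB_items, hv, Ne.symm hv]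
    by_cases g23 : c = 'u'
    · subst g23
      by_cases hv : c' = 'u'
      · subst hv; simp [aScan, ipaMapA, PySem.Dict.get?, PySem.Dict.getD, digraphsB_items, singleB_items]
      simp [aScan, ipaMapA, PySem.Dict.get?, PySem.Dict.getD, digraphsB_items, singleB_items, hv, Ne.symm hv]
    simp [aScan, ipaMapA, PySem.Dict.get?, PySem.Dict.getD, digraphsB_items, singleB_items, g0, Ne.symm g0, g1, Ne.symm g1, g2, Ne.symm g2, g3, Ne.symm g3, g4, Ne.symm g4, g5, Ne.symm g5, g6, Ne.symm g6, g7, Ne.symm g7, g8, Ne.symm g8, g9, Ne.symm g9, g10, Ne.symm g10, g11, Ne.symm g11, g12, Ne.symm g12, g13, Ne.symm g13, g14, Ne.symm g14, g15, Ne.symm g15, g16, Ne.symm g16, g17, Ne.symm g17, g18, Ne.symm g18, g19, Ne.symm g19, g20, Ne.symm g20, g21, Ne.symm g21, g22, Ne.symm g22, g23, Ne.symm g23]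

-- one step of A's loop when no digraph matches at the front
theorem aLoop_step1 (c : Char) (rest : List Char)
    (h2 : digraphsB.get? ((c :: rest).take 2) = none) :
    aLoop (c :: rest) = singleB.getD [c] [c] :: aLoop rest := by
  rw [aLoop]
  split
  next src tgt heq =>
    rw [scan_eq, h2] at heq
    cases h3 : singleB.get? [c] with
    | some t =>
      rw [h3] at heq
      simp only [Option.some.injEq, Prod.mk.injEq] at heq
      obtain ⟨hsrc, htgt⟩ := heq
      subst hsrc; subst htgt
      simp [PySem.Dict.getD, h3]
    | none => rw [h3] at heq; simp at heq
  next heq =>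
    rw [scan_eq, h2] at heq
    cases h3 : singleB.get? [c] with
    | some t => rw [h3] at heq; simp at heq
    | none => simp [PySem.Dict.getD, h3]

-- one step of A's loop when a digraph matches at the front
theorem aLoop_step2 (c c' : Char) (rest : List Char) (t : List Char)
    (h2 : digraphsB.get? [c, c'] = some t) :
    aLoop (c :: c' :: rest) = t :: aLoop rest := by
  rw [aLoop]
  split
  next src tgt heq =>
    rw [scan_eq] at heq
    simp only [List.take_succ_cons, List.take_zero] at heq
    rw [h2] at heq
    simp only [Option.some.injEq, Prod.mk.injEq] at heq
    obtain ⟨hsrc, htgt⟩ := heq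
    subst hsrc; subst htgt
    simp
  next heq =>
    rw [scan_eq] at heq
    simp only [List.take_succ_cons, List.take_zero] at heq
    rw [h2] at heq
    simp at heq

theorem loops_eq (n : Nat) : ∀ cs : List Char, cs.length ≤ n →
    bLoop [] cs = aLoop cs ∧ ∀ p : Char, bLoop [p] cs = aLoop (p :: cs) := by
  induction n with
  | zero =>
    intro cs h
    rw [List.eq_nil_of_length_eq_zero (Nat.le_zero.mp h)]
    constructor
    · rw [aLoop]; rfl
    · intro p
      rw [aLoop_step1 p [] (digraph_singleton_none p), aLoop]
      rfl
  | succ n ih =>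
    intro cs hlen
    match cs with
    | [] =>
      constructor
      · rw [aLoop]; rfl
      · intro p
        rw [aLoop_step1 p [] (digraph_singleton_none p), aLoop]
        rfl
    | c :: rest =>
      have hr : rest.length ≤ n := by simp at hlen; omega
      constructor
      · -- bLoop [] (c :: rest) = aLoop (c :: rest)
        rw [bLoop]
        simp only [List.isEmpty_nil, if_true]
        by_cases hc : bStarters.contains c
        · rw [if_pos hc]
          exact (ih rest hr).2 c
        · rw [if_neg hc]
          have h2 : digraphsB.get? ((c :: rest).take 2) = none := by
            rw [List.take_succ_cons]
            exact digraph_nonstarter_none c _ (Bool.not_eq_true _ ▸ (by simpa using hc))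
          rw [aLoop_step1 c rest h2]
          exact congrArg _ (ih rest hr).1
      · intro p
        rw [bLoop]
        simp only [List.isEmpty_cons, if_false, Bool.false_eq_true, List.cons_append,
          List.nil_append]
        cases h2 : digraphsB.get? [p, c] with
        | some t =>
          rw [aLoop_step2 p c rest t h2]
          exact congrArg _ (ih rest hr).1
        | none =>
          have hstep : aLoop (p :: c :: rest) = singleB.getD [p] [p] :: aLoop (c :: rest) := by
            apply aLoop_step1
            simpa using h2
          rw [hstep]
          by_cases hc : bStarters.contains c
          · rw [if_pos hc]
            exact congrArg _ ((ih rest hr).2 c)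
          · rw [if_neg hc]
            have h2' : digraphsB.get? ((c :: rest).take 2) = none := by
              rw [List.take_succ_cons]
              exact digraph_nonstarter_none c _ (by simpa using hc)
            rw [aLoop_step1 c rest h2']
            exact congrArg _ (congrArg _ (ih rest hr).1)

-- ===== VERDICT (by name: the statement is the Claim_ definition above) =====
theorem mutsun_to_ipa_spec : Claim_equal_mutsun_to_ipa := by
  intro word _
  unfold Spec_mutsun_to_ipa mutsun_to_ipa mutsun_to_ipa_alt
  rw [(loops_eq (mutsunClean word.toList).length _ le_rfl).1]
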